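-- pv_equiv track=rewrite | github.com/EugeneYuuu/RepoRAG-MCP | Compliance/hookAnalysis.py | extractHookEntries
-- ===== SOURCE A (Python) =====
-- def extractHookEntries(text):
--     lines = text.split('\n')
--     hook_entries = []
--     current_entry = []
--     in_hook_entry = False
--
--     for line in lines:
--         line = line.strip()
--         if line.startswith('hook:'):
--             if current_entry:
--                 hook_entries.append('\n'.join(current_entry))
--                 current_entry = []
--             in_hook_entry = True
--             current_entry.append(line)
--         elif in_hook_entry:
--             if line:
--                 current_entry.append(line)
--             else:
--                 if current_entry:
--                     hook_entries.append('\n'.join(current_entry))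
--                     current_entry = []
--                 in_hook_entry = False
--
--     if current_entry:
--         hook_entries.append('\n'.join(current_entry))
--
--     return hook_entries
-- ===== SOURCE B (Python) =====
-- def extractHookEntries(text):
--     stripped = [ln.strip() for ln in text.split('\n')]
--     entries = []
--     for i, ln in enumerate(stripped):
--         if ln.startswith('hook:'):
--             body = []
--             for nxt in stripped[i + 1:]:
--                 if not nxt or nxt.startswith('hook:'):
--                     break
--                 body.append(nxt)
--             entries.append('\n'.join([ln] + body))
--     return entries
-- ===== Notes on version B (the rewrite author's own statement) =====
-- stated objective: alternative
-- what changed: Replaces A's flag-driven single-pass state machine (in_hook_entry/current_entry accumulators with flush points) by an index-first two-phase traversal: strip all lines once, then for each line starting with 'hook:' scan forward over the suffix to collect its body and emit the joined entry directly.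
import Mathlib
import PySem

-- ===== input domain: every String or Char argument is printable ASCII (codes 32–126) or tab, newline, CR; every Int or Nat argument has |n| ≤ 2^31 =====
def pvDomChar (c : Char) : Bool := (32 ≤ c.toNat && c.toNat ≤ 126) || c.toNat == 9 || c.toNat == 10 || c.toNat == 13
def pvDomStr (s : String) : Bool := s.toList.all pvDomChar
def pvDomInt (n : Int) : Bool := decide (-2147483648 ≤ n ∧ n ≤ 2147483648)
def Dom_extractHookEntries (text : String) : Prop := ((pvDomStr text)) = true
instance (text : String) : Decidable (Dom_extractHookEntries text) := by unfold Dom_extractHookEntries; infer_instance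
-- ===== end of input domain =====

-- B replaces A's flag-driven single pass by an index-first two-phase traversal (strip all lines,
-- then for each 'hook:' line scan forward over the suffix for its body); objective: alternative.

-- ===== PORT A =====
-- loop body of A: strip the line, then the hook / in-entry / skip branches, over the
-- state (hook_entries, current_entry, in_hook_entry)
def pvStepA (s : List String × List String × Bool) (line : String) :
    List String × List String × Bool :=
  let line := PySem.Str.strip line
  if PySem.Str.startswith line "hook:" then
    ((if s.2.1 ≠ [] then s.1 ++ [PySem.Str.join "\n" s.2.1] else s.1), [line], true)
  else if s.2.2 then
    if line ≠ "" then
      (s.1, s.2.1 ++ [line], s.2.2)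
    else
      ((if s.2.1 ≠ [] then s.1 ++ [PySem.Str.join "\n" s.2.1] else s.1), [], false)
  else s

def extractHookEntries (text : String) : List String :=
  -- text.split('\n'): sep "\n" is non-empty, so split? is never none
  let lines := (PySem.Str.split? text "\n").getD []
  let st := lines.foldl pvStepA ([], [], false)
  st.1 ++ (if st.2.1 ≠ [] then [PySem.Str.join "\n" st.2.1] else [])

-- ===== PORT B =====
-- B's inner loop: collect body lines of one entry from the suffix, breaking at an empty
-- or 'hook:' line
def pvBody : List String → List String
  | [] => []
  | nxt :: rest =>
    if nxt = "" ∨ PySem.Str.startswith nxt "hook:" then []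
    else nxt :: pvBody rest

def extractHookEntries_alt (text : String) : List String :=
  -- text.split('\n'): sep "\n" is non-empty, so split? is never none
  let stripped := ((PySem.Str.split? text "\n").getD []).map PySem.Str.strip
  (PySem.List.enumerate stripped 0).foldl
    (fun entries p =>
      if PySem.Str.startswith p.2 "hook:" then
        entries ++ [PySem.Str.join "\n" ([p.2] ++ pvBody (PySem.List.slice stripped (some (p.1 + 1)) none))]
      else entries) []

-- ===== PRECONDITION & SPEC =====
def Spec_extractHookEntries (text : String) (out : List String) : Prop := out = extractHookEntries_alt text
instance (text : String) (out : List String) : Decidable (Spec_extractHookEntries text out) := by unfold Spec_extractHookEntries; infer_instance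

-- ===== CLAIM (what is proved, stated in full; the proofs are below) =====
def Claim_equal_extractHookEntries : Prop := ∀ (text : String), Dom_extractHookEntries text → Spec_extractHookEntries text (extractHookEntries text)

-- ===== LEMMAS AND PROOFS =====

-- reference form of B on an already-stripped line list
def pvRun : List String → List String
  | [] => []
  | l :: rest =>
    if PySem.Str.startswith l "hook:" then
      PySem.Str.join "\n" (l :: pvBody rest) :: pvRun rest
    else pvRun rest

lemma pvRun_cons_not_hook {l : String} (h : PySem.Str.startswith l "hook:" = false)
    (rest : List String) : pvRun (l :: rest) = pvRun rest := by
  simp only [pvRun, h, Bool.false_eq_true, if_false]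

-- B's fold over enumerate equals pvRun on the suffix
lemma alt_fold_eq_pvRun (full : List String) (ls : List String) : ∀ (k : Nat) (acc : List String),
    full.drop k = ls →
    (PySem.List.enumerate ls (k : Int)).foldl
      (fun entries p =>
        if PySem.Str.startswith p.2 "hook:" then
          entries ++ [PySem.Str.join "\n" ([p.2] ++ pvBody (PySem.List.slice full (some (p.1 + 1)) none))]
        else entries) acc
    = acc ++ pvRun ls := by
  induction ls with
  | nil => intro k acc h; simp [PySem.List.enumerate, pvRun]
  | cons l rest ih =>
    intro k acc h
    have hdrop : full.drop (k + 1) = rest := by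
      have h2 := List.drop_drop (l := full) (i := 1) (j := k)
      rw [h] at h2
      simpa [Nat.add_comm] using h2.symm
    have hcast : ((k : Int) + 1) = ((k + 1 : Nat) : Int) := by push_cast; ring
    have hslice : PySem.List.slice full (some ((k + 1 : Nat) : Int)) none = rest := by
      rw [PySem.List.slice_from_natCast, hdrop]
    rw [PySem.List.enumerate_cons, List.foldl_cons, hcast, ih (k + 1) _ hdrop]
    by_cases hh : PySem.Str.startswith l "hook:" = true
    · simp only [pvRun, hh, if_true, hslice, List.cons_append, List.nil_append,
        List.append_assoc]
    · rw [pvRun_cons_not_hook (Bool.eq_false_iff.mpr hh)]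
      simp only [hh, Bool.false_eq_true, if_false]

-- A's final flush: hook_entries plus the pending current_entry if non-empty
def pvFinish (st : List String × List String × Bool) : List String :=
  st.1 ++ (if st.2.1 ≠ [] then [PySem.Str.join "\n" st.2.1] else [])

-- A's fold, started in either reachable state, produces pvRun's output
lemma a_fold_eq_pvRun (ls : List String) : ∀ (acc cur : List String),
    (pvFinish (ls.foldl pvStepA (acc, [], false)) = acc ++ pvRun (ls.map PySem.Str.strip))
    ∧ (cur ≠ [] →
       pvFinish (ls.foldl pvStepA (acc, cur, true))
         = acc ++ PySem.Str.join "\n" (cur ++ pvBody (ls.map PySem.Str.strip))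
             :: pvRun (ls.map PySem.Str.strip)) := by
  induction ls with
  | nil =>
    intro acc cur
    refine ⟨by simp [pvFinish, pvRun], fun hc => ?_⟩
    simp [pvFinish, pvRun, pvBody, hc]
  | cons l rest ih =>
    intro acc cur
    simp only [List.foldl_cons, List.map_cons, pvStepA]
    generalize PySem.Str.strip l = m
    by_cases hh : PySem.Str.startswith m "hook:" = true
    · have hH : PySem.Chars.startswith m.toList ['h', 'o', 'o', 'k', ':'] = true := by
        simpa using hh
      constructor
      · simp only [hh, if_true, ne_eq, not_true_eq_false, if_false]
        rw [(ih acc [m]).2 (by simp)]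
        simp [pvRun, hH]
      · intro hc
        simp only [hh, ne_eq, hc, not_false_iff, if_pos]
        rw [(ih (acc ++ [PySem.Str.join "\n" cur]) [m]).2 (by simp)]
        simp [pvRun, pvBody, hH]
    · have hh' : PySem.Str.startswith m "hook:" = false := Bool.eq_false_iff.mpr hh
      have hH : PySem.Chars.startswith m.toList ['h', 'o', 'o', 'k', ':'] = false := by
        simpa using hh'
      constructor
      · simp only [hh', Bool.false_eq_true, if_false]
        rw [(ih acc cur).1, pvRun_cons_not_hook hh']
      · intro hc
        by_cases he : m = ""
        · have hstep : (if m ≠ "" then (acc, cur ++ [m], true)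
              else ((if cur ≠ [] then acc ++ [PySem.Str.join "\n" cur] else acc), ([] : List String), false))
              = ((acc ++ [PySem.Str.join "\n" cur]), ([] : List String), false) := by
            simp [he, hc]
          simp only [hh', Bool.false_eq_true, if_false, hstep, reduceIte]
          rw [(ih (acc ++ [PySem.Str.join "\n" cur]) cur).1, pvRun_cons_not_hook hh']
          simp [pvBody, he]
        · have hstep : (if m ≠ "" then (acc, cur ++ [m], true)
              else ((if cur ≠ [] then acc ++ [PySem.Str.join "\n" cur] else acc), ([] : List String), false))
              = (acc, cur ++ [m], true) := by
            simp [he]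
          simp only [hh', Bool.false_eq_true, if_false, hstep, reduceIte]
          rw [(ih acc (cur ++ [m])).2 (by simp), pvRun_cons_not_hook hh']
          simp [pvBody, he, hH]

-- ===== VERDICT (by name: the statement is the Claim_ definition above) =====
theorem extractHookEntries_spec : Claim_equal_extractHookEntries := by
  intro text _
  show extractHookEntries text = extractHookEntries_alt text
  unfold extractHookEntries extractHookEntries_alt
  set L := (PySem.Str.split? text "\n").getD [] with hL
  have hA := (a_fold_eq_pvRun L [] []).1
  have hB := alt_fold_eq_pvRun (L.map PySem.Str.strip) (L.map PySem.Str.strip) 0 [] (by simp)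
  simp only [pvFinish] at hA
  simp only [Nat.cast_zero] at hB
  rw [hA, hB]
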